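-- pv_equiv track=rewrite | github.com/Ry4nW/python-wars | binarysearch/longestInterval.py | solve
-- ===== SOURCE A (Python) =====
-- def solve(intervals):
--     intervals.sort()
--
--     if len(intervals) == 1:
--         return intervals[0][1] - intervals[0][0] + 1
--
--     i = 0
--     longestInterval = 0
--
--     while i < len(intervals):
--
--         if i < len(intervals) - 1 and intervals[i][1] >= intervals[i + 1][0]:
--             intervals[i][1] = max(intervals[i + 1][1], intervals[i][1])
--             del intervals[i + 1]
--             i -= 1
--
--         dif = intervals[i][1] - intervals[i][0] + 1
--         longestInterval = dif if longestInterval < dif else longestInterval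
--         i += 1
--
--     return longestInterval
-- ===== SOURCE B (Python) =====
-- # B: sort a copy, then one linear sweep merging consecutive overlaps while tracking the best span
-- # (A sorts/deletes the input list in place; B does not mutate it — equivalence is about the return value).
-- def solve(intervals):
--     if len(intervals) == 1:
--         return intervals[0][1] - intervals[0][0] + 1
--     best = 0
--     cur_s = cur_e = None
--     for iv in sorted(intervals):
--         s, e = iv[0], iv[1]
--         if cur_s is None:
--             cur_s, cur_e = s, e
--         elif cur_e >= s:
--             if e > cur_e:
--                 cur_e = e
--         else:
--             span = cur_e - cur_s + 1
--             if span > best: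
--                 best = span
--             cur_s, cur_e = s, e
--     if cur_s is not None:
--         span = cur_e - cur_s + 1
--         if span > best:
--             best = span
--     return best
-- ===== Notes on version B (the rewrite author's own statement) =====
-- stated objective: alternative
-- what changed: A repeatedly merges by mutating the sorted list in place (del of the next element plus an index back-off, an O(n) deletion per merge, and it mutates the caller's list); B sorts a copy once and does a single linear sweep that keeps only the current merged interval and the best span, never touching the list.
import Mathlib
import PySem

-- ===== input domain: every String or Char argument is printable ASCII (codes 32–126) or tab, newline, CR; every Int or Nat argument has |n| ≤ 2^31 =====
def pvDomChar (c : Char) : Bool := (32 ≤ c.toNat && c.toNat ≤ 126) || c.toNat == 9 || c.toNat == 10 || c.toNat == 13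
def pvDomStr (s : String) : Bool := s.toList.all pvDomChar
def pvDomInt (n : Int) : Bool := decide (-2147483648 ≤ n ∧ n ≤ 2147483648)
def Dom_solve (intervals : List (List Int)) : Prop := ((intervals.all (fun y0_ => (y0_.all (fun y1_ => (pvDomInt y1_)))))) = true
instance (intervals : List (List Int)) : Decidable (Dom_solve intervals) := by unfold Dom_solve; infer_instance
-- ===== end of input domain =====

-- B replaces A's delete-in-place merge loop by a single linear sweep over a sorted copy
-- (A sorts and deletes inside the caller's list; B leaves it untouched — the equivalence proved is about the RETURN value only).

-- iv[0] / iv[1] / iv[1] = v  (defaults are never reached under Pre_solve: every interval has length ≥ 2)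
def get0 (iv : List Int) : Int := iv.getD 0 0
def get1 (iv : List Int) : Int := iv.getD 1 0
def set1 (iv : List Int) (v : Int) : List Int := iv.set 1 v
-- Python sorted(list of int-lists): lexicographic order on List Int (List.Lex (· < ·), shorter prefix first)
def pySortLists (xs : List (List Int)) : List (List Int) :=
  @PySem.List.sorted _ _ List.instLinearOrder.toLT LinearOrder.toDecidableLT xs (fun x => x) false

-- ===== PORT A =====
-- the while-loop: state = (current list, i, longestInterval)
-- dif = intervals[i][1] - intervals[i][0] + 1; longestInterval = dif if longestInterval < dif else longestInterval
def updMax (longest : Int) (iv : List Int) : Int :=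
  if longest < get1 iv - get0 iv + 1 then get1 iv - get0 iv + 1 else longest

def loopA (l : List (List Int)) (i : Nat) (longest : Int) : Int :=
  if h : i < l.length then
    if hc : i < l.length - 1 ∧ get0 (l.getD (i+1) []) ≤ get1 (l.getD i []) then
      -- intervals[i][1] = max(intervals[i+1][1], intervals[i][1]); del intervals[i+1]; i -= 1;
      -- dif is computed at intervals[i] AFTER i -= 1 (index may be -1: Python wraps to the last element);
      -- then i += 1, so the loop resumes at the same i
      loopA ((l.set i (set1 (l.getD i []) (max (get1 (l.getD (i+1) [])) (get1 (l.getD i []))))).eraseIdx (i+1)) i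
        (updMax longest ((PySem.List.pyGet? ((l.set i (set1 (l.getD i []) (max (get1 (l.getD (i+1) [])) (get1 (l.getD i []))))).eraseIdx (i+1)) ((i : Int) - 1)).getD []))
    else
      loopA l (i+1) (updMax longest (l.getD i []))
  else longest
termination_by 2 * l.length - i
decreasing_by
  · have h2 : ((l.set i (set1 (l.getD i []) (max (get1 (l.getD (i+1) [])) (get1 (l.getD i []))))).eraseIdx (i+1)).length = l.length - 1 := by
      rw [List.length_eraseIdx]
      simp only [List.length_set]
      rw [if_pos (by omega : i + 1 < l.length)]
    simp only [h2]; omega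
  · omega

def solve (intervals : List (List Int)) : Int :=
  if (pySortLists intervals).length = 1 then
    get1 ((pySortLists intervals).getD 0 []) - get0 ((pySortLists intervals).getD 0 []) + 1
  else loopA (pySortLists intervals) 0 0

-- ===== PORT B =====
-- one step of the sweep: state = (best, current merged interval or None)
def stepB (st : Int × Option (Int × Int)) (iv : List Int) : Int × Option (Int × Int) :=
  let s := get0 iv
  let e := get1 iv
  match st with
  | (best, none) => (best, some (s, e))
  | (best, some (cs, ce)) =>
    if ce ≥ s then (best, some (cs, if e > ce then e else ce))
    else ((if ce - cs + 1 > best then ce - cs + 1 else best), some (s, e))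

def solve_alt (intervals : List (List Int)) : Int :=
  if intervals.length = 1 then
    get1 (intervals.getD 0 []) - get0 (intervals.getD 0 []) + 1
  else
    match (pySortLists intervals).foldl stepB (0, none) with
    | (best, none) => best
    | (best, some (cs, ce)) => if ce - cs + 1 > best then ce - cs + 1 else best

-- ===== PRECONDITION & SPEC =====
-- Pre_: every interval has at least two entries; on shorter inner lists Python A raises IndexError.
def Pre_solve (intervals : List (List Int)) : Prop := ∀ iv ∈ intervals, 2 ≤ iv.length
instance (intervals : List (List Int)) : Decidable (Pre_solve intervals) := by unfold Pre_solve; infer_instance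

def pvWitness_solve : List (List Int) := [[1, 3], [2, 5], [9, 9]]

def Spec_solve (intervals : List (List Int)) (out : Int) : Prop := out = solve_alt intervals
instance (intervals : List (List Int)) (out : Int) : Decidable (Spec_solve intervals out) := by unfold Spec_solve; infer_instance

-- ===== CLAIM (what is proved, stated in full; the proofs are below) =====
def Claim_equal_solve : Prop := ∀ (intervals : List (List Int)), Dom_solve intervals → Pre_solve intervals → Spec_solve intervals (solve intervals)

-- ===== LEMMAS AND PROOFS =====

-- the common functional core: sweep over `rest` with current interval (cs, ce) and best-so-far `best`
def run (cs ce : Int) (rest : List (List Int)) (best : Int) : Int :=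
  match rest with
  | [] => max best (ce - cs + 1)
  | iv :: rest' =>
    if get0 iv ≤ ce then run cs (max ce (get1 iv)) rest' best
    else run (get0 iv) (get1 iv) rest' (max best (ce - cs + 1))

lemma updMax_eq (longest : Int) (iv : List Int) :
    updMax longest iv = max longest (get1 iv - get0 iv + 1) := by
  unfold updMax; split <;> omega

lemma run_max (rest : List (List Int)) : ∀ cs ce b x,
    run cs ce rest (max b x) = max (run cs ce rest b) x := by
  induction rest with
  | nil => intro cs ce b x; simp [run]; omega
  | cons iv rest' ih =>
    intro cs ce b x
    simp only [run]
    split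
    · exact ih _ _ _ _
    · rw [show max (max b x) (ce - cs + 1) = max (max b (ce - cs + 1)) x by omega]
      exact ih _ _ _ _

lemma run_ge_last (rest : List (List Int)) : ∀ cs ce best,
    (∀ iv ∈ rest, cs ≤ get0 iv) →
    rest.Pairwise (fun a b => get0 a ≤ get0 b) →
    (match rest.getLast? with
     | none => ce - cs + 1
     | some iv => get1 iv - get0 iv + 1) ≤ run cs ce rest best := by
  induction rest with
  | nil => intro cs ce best _ _; simp only [run, List.getLast?_nil]; omega
  | cons iv rest' ih =>
    intro cs ce best hlo hpw
    rw [List.pairwise_cons] at hpw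
    cases rest' with
    | nil =>
      have h0 := hlo iv (by simp)
      simp only [run, List.getLast?_singleton]
      split <;> omega
    | cons r2 t2 =>
      have hne : (r2 :: t2) ≠ [] := by simp
      have hl : (r2 :: t2).getLast? = some ((r2 :: t2).getLast hne) := List.getLast?_eq_some_getLast hne
      rw [List.getLast?_cons_cons, hl]
      rw [run.eq_def]
      simp only []
      split
      · have h := ih cs (max ce (get1 iv)) best
          (fun x hx => hlo x (List.mem_cons_of_mem _ hx)) hpw.2
        rw [hl] at h
        simpa only [] using h
      · have h := ih (get0 iv) (get1 iv) (max best (ce - cs + 1))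
          (fun x hx => hpw.1 x hx) hpw.2
        rw [hl] at h
        simpa only [] using h

-- Python's l[-1]: the last element
lemma pyGet?_neg_one {α : Type} (x : α) (l : List α) :
    PySem.List.pyGet? (x :: l) (-1) = (x :: l).getLast? := by
  simp only [PySem.List.pyGet?, PySem.List.pyIdx?]
  rw [if_neg (by omega), if_pos (by simp)]
  simp [List.getLast?_eq_getElem?]

-- a finished loop: i past the end returns the accumulator
lemma loopA_terminal (l : List (List Int)) (i : Nat) (v : Int) (h : l.length ≤ i) :
    loopA l i v = v := by
  rw [loopA]; simp [Nat.not_lt.mpr h]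

-- the A-loop at position i = pre.length computes the sweep over cur :: rest
lemma loopA_run (rest : List (List Int)) : ∀ (pre : List (List Int)) (cur : List Int) (longest : Int),
    (∀ iv ∈ pre ++ cur :: rest, 2 ≤ iv.length) →
    (cur :: rest).Pairwise (fun a b => get0 a ≤ get0 b) →
    (∀ p ∈ pre.getLast?, get1 p - get0 p + 1 ≤ longest) →
    loopA (pre ++ cur :: rest) pre.length longest = run (get0 cur) (get1 cur) rest longest := by
  induction rest with
  | nil =>
    intro pre cur longest h2 hpw hlast
    have hget : (pre ++ [cur]).getD pre.length [] = cur := by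
      rw [List.getD_eq_getElem?_getD, List.getElem?_append_right (le_refl _)]; simp
    rw [loopA, dif_pos (by simp), hget, dif_neg (by simp),
      loopA_terminal _ _ _ (by simp), updMax_eq]
    simp only [run]
  | cons r rest' ih =>
    intro pre cur longest h2 hpw hlast
    have hcur2 : 2 ≤ cur.length := h2 cur (by simp)
    have hgetI : (pre ++ cur :: r :: rest').getD pre.length [] = cur := by
      rw [List.getD_eq_getElem?_getD, List.getElem?_append_right (le_refl _)]; simp
    have hgetI1 : (pre ++ cur :: r :: rest').getD (pre.length + 1) [] = r := by
      rw [List.getD_eq_getElem?_getD, List.getElem?_append_right (by omega)]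
      have h1 : pre.length + 1 - pre.length = 1 := by omega
      rw [h1]; simp
    rw [List.pairwise_cons] at hpw
    obtain ⟨hcur_le, hpw2⟩ := hpw
    have hpw3 := (List.pairwise_cons.mp hpw2).2
    have hr_le := (List.pairwise_cons.mp hpw2).1
    rw [loopA, dif_pos (by simp), hgetI, hgetI1]
    by_cases hov : get0 r ≤ get1 cur
    · rw [dif_pos ⟨by simp, hov⟩]
      have hsetL : (pre ++ cur :: r :: rest').set pre.length (set1 cur (max (get1 r) (get1 cur))) =
          pre ++ set1 cur (max (get1 r) (get1 cur)) :: r :: rest' := by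
        rw [List.set_append, if_neg (by omega)]; simp
      have heraseL : (pre ++ set1 cur (max (get1 r) (get1 cur)) :: r :: rest').eraseIdx (pre.length + 1) =
          pre ++ set1 cur (max (get1 r) (get1 cur)) :: rest' := by
        rw [List.eraseIdx_append_of_length_le (by omega)]
        have h1 : pre.length + 1 - pre.length = 1 := by omega
        rw [h1, List.eraseIdx_cons_succ, List.eraseIdx_cons_zero]
      rw [hsetL, heraseL]
      set m := set1 cur (max (get1 r) (get1 cur)) with hm
      have hm0 : get0 m = get0 cur := by
        simp only [hm, get0, set1, List.getD_eq_getElem?_getD, List.getElem?_set_ne (by omega : (1:Nat) ≠ 0)]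
      have hm1 : get1 m = max (get1 r) (get1 cur) := by
        simp only [hm, get1, set1, List.getD_eq_getElem?_getD, List.getElem?_set_self (by omega : 1 < cur.length), Option.getD_some]
      have h2' : ∀ iv ∈ pre ++ m :: rest', 2 ≤ iv.length := by
        intro iv hiv
        rcases List.mem_append.mp hiv with h | h
        · exact h2 iv (List.mem_append.mpr (Or.inl h))
        · rcases List.mem_cons.mp h with h | h
          · subst h; simpa [hm, set1] using hcur2
          · exact h2 iv (by simp [h])
      have hpw' : (m :: rest').Pairwise (fun a b => get0 a ≤ get0 b) := by
        rw [List.pairwise_cons]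
        exact ⟨fun b hb => by rw [hm0]; exact hcur_le b (by simp [hb]), hpw3⟩
      have hrhs : run (get0 cur) (get1 cur) (r :: rest') longest =
          run (get0 cur) (max (get1 cur) (get1 r)) rest' longest := by
        rw [run.eq_def]; simp only []; rw [if_pos hov]
      rcases pre with _ | ⟨p, pre'⟩
      · -- i = 0: Python reads intervals[-1], the last element of the merged list
        simp only [List.nil_append, List.length_nil]
        have hread : PySem.List.pyGet? (m :: rest') ((((0:Nat)) : Int) - 1) = (m :: rest').getLast? := by
          rw [show ((((0:Nat)) : Int) - 1) = -1 by simp]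
          exact pyGet?_neg_one m rest'
        rw [hread]
        have hlastsome : ∃ L, (m :: rest').getLast? = some L :=
          ⟨(m :: rest').getLast (by simp), List.getLast?_eq_some_getLast (by simp)⟩
        obtain ⟨L, hL⟩ := hlastsome
        rw [hL]
        simp only [Option.getD_some, updMax_eq]
        have hihres := ih [] m (max longest (get1 L - get0 L + 1)) h2' hpw' (by simp)
        simp only [List.nil_append, List.length_nil] at hihres
        rw [hihres, run_max]
        have hge := run_ge_last rest' (get0 m) (get1 m) longest
          (fun iv hiv => by rw [hm0]; exact hcur_le iv (by simp [hiv])) hpw3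
        have habs : get1 L - get0 L + 1 ≤ run (get0 m) (get1 m) rest' longest := by
          rcases rest' with _ | ⟨q, t⟩
          · simp at hL; subst hL
            simpa only [List.getLast?_nil] using hge
          · rw [List.getLast?_cons_cons, List.getLast?_eq_some_getLast (by simp : (q :: t) ≠ [])] at hL
            rw [List.getLast?_eq_some_getLast (by simp : (q :: t) ≠ [])] at hge
            simp only [Option.some.injEq] at hL
            subst hL
            simpa only [] using hge
        rw [hrhs, hm0, hm1, max_comm (get1 r) (get1 cur)] at *
        omega
      · -- i ≥ 1: Python reads intervals[i-1] = the last already-finished interval of pre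
        have hplen : (p :: pre').length = pre'.length + 1 := by simp
        have hcast : ((((p :: pre').length : Int)) - 1) = ((pre'.length : Nat) : Int) := by
          simp only [List.length_cons]; omega
        have hread : PySem.List.pyGet? ((p :: pre') ++ m :: rest') (((p :: pre').length : Int) - 1) =
            (p :: pre').getLast? := by
          rw [hcast, PySem.List.pyGet?_natCast, List.getElem?_append]
          rw [if_pos (by simp)]
          rw [List.getLast?_eq_getElem?]
          simp
        rw [hread]
        have hLp : (p :: pre').getLast? = some ((p :: pre').getLast (by simp)) :=
          List.getLast?_eq_some_getLast (by simp)
        rw [hLp]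
        simp only [Option.getD_some, updMax_eq]
        have hle := hlast ((p :: pre').getLast (by simp)) (by rw [hLp]; simp)
        have habs : max longest (get1 ((p :: pre').getLast (by simp)) - get0 ((p :: pre').getLast (by simp)) + 1) = longest := by
          omega
        rw [habs]
        have hihres := ih (p :: pre') m longest h2' hpw'
          (fun q hq => by rw [hLp] at hq; simp at hq; subst hq; exact hle)
        rw [hihres, hrhs, hm0, hm1, max_comm (get1 r) (get1 cur)]
    · rw [dif_neg (by intro hand; exact hov hand.2), updMax_eq]
      have happ : pre ++ cur :: r :: rest' = (pre ++ [cur]) ++ r :: rest' := by simp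
      have hlen1 : pre.length + 1 = (pre ++ [cur]).length := by simp
      rw [happ, hlen1]
      have h2' : ∀ iv ∈ (pre ++ [cur]) ++ r :: rest', 2 ≤ iv.length := by
        rw [← happ]; exact h2
      have hihres := ih (pre ++ [cur]) r (max longest (get1 cur - get0 cur + 1)) h2' hpw2
        (by
          intro q hq
          rw [List.getLast?_concat] at hq
          simp at hq; subst hq; omega)
      have hrhs2 : run (get0 cur) (get1 cur) (r :: rest') longest =
          run (get0 r) (get1 r) rest' (max longest (get1 cur - get0 cur + 1)) := by
        rw [run.eq_def]; simp only []; rw [if_neg hov]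
      rw [hihres, hrhs2]

-- flushing the fold state (the trailing `if cur_s is not None` of Source B)
def flushB (st : Int × Option (Int × Int)) : Int :=
  match st with
  | (best, none) => best
  | (best, some (cs, ce)) => if ce - cs + 1 > best then ce - cs + 1 else best

lemma foldB_run (rest : List (List Int)) : ∀ cs ce best,
    flushB (rest.foldl stepB (best, some (cs, ce))) = run cs ce rest best := by
  induction rest with
  | nil => intro cs ce best; simp [flushB, run]; omega
  | cons iv rest' ih =>
    intro cs ce best
    simp only [List.foldl_cons, stepB, run]
    split
    · rw [show (if get1 iv > ce then get1 iv else ce) = max ce (get1 iv) by split <;> omega]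
      exact ih _ _ _
    · rw [show (if ce - cs + 1 > best then ce - cs + 1 else best) = max best (ce - cs + 1) by split <;> omega]
      exact ih _ _ _

-- lexicographic ≤ on nonempty int lists forces ≤ on the heads
lemma head_le_of_list_le (a b : List Int) (ha : a ≠ []) (hb : b ≠ [])
    (h : @LE.le (List Int) (List.instLinearOrder.toLE) a b) : get0 a ≤ get0 b := by
  obtain ⟨x, u, rfl⟩ := List.exists_cons_of_ne_nil ha
  obtain ⟨y, v, rfl⟩ := List.exists_cons_of_ne_nil hb
  rcases le_iff_lt_or_eq.mp h with hlt | heq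
  · have hlex : List.Lex (fun p q : Int => p < q) (x :: u) (y :: v) := hlt
    cases hlex with
    | rel h' => simp only [get0, List.getD_cons_zero]; omega
    | cons _ => simp [get0]
  · cases heq; exact le_refl _

-- the sorted list is nondecreasing on first components
lemma sorted_get0_pairwise (xs : List (List Int)) (hx : ∀ iv ∈ xs, 2 ≤ iv.length) :
    (pySortLists xs).Pairwise (fun a b => get0 a ≤ get0 b) := by
  have hp := PySem.List.sorted_pairwise (κ := List Int) xs (fun x => x)
  refine hp.imp_of_mem ?_
  intro a b hma hmb hab
  have h2a := hx a ((@PySem.List.mem_sorted _ _ List.instLinearOrder.toLT LinearOrder.toDecidableLT xs (fun x => x) false a).mp hma)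
  have h2b := hx b ((@PySem.List.mem_sorted _ _ List.instLinearOrder.toLT LinearOrder.toDecidableLT xs (fun x => x) false b).mp hmb)
  exact head_le_of_list_le a b (by intro hn; subst hn; simp at h2a)
    (by intro hn; subst hn; simp at h2b) hab

-- ===== VERDICT (by name: the statement is the Claim_ definition above) =====
theorem solve_spec : Claim_equal_solve := by
  intro intervals _hdom hpre
  unfold Spec_solve solve solve_alt
  have hlen : (pySortLists intervals).length = intervals.length :=
    @PySem.List.length_sorted _ _ List.instLinearOrder.toLT LinearOrder.toDecidableLT intervals (fun x => x) false
  by_cases h1 : intervals.length = 1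
  · obtain ⟨iv, rfl⟩ := List.length_eq_one_iff.mp h1
    have hs : pySortLists [iv] = [iv] :=
      List.perm_singleton.mp (@PySem.List.sorted_perm _ _ List.instLinearOrder.toLT LinearOrder.toDecidableLT [iv] (fun x => x) false)
    rw [hs]
    simp
  · rw [if_neg (by rw [hlen]; exact h1), if_neg h1]
    have hpre' : ∀ iv ∈ pySortLists intervals, 2 ≤ iv.length := fun iv hiv =>
      hpre iv ((@PySem.List.mem_sorted _ _ List.instLinearOrder.toLT LinearOrder.toDecidableLT
        intervals (fun x => x) false iv).mp hiv)
    have hpw := sorted_get0_pairwise intervals hpre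
    cases hs : pySortLists intervals with
    | nil =>
      rw [loopA_terminal _ _ _ (by simp)]
      rfl
    | cons c rest =>
      rw [hs] at hpre' hpw
      have hrun := loopA_run rest [] c 0 (by simpa using hpre') hpw (by simp)
      simp only [List.nil_append, List.length_nil] at hrun
      rw [hrun]
      have hfold : (c :: rest).foldl stepB ((0 : Int), (none : Option (Int × Int))) =
          rest.foldl stepB (0, some (get0 c, get1 c)) := by
        simp [stepB]
      rw [hfold, ← foldB_run rest (get0 c) (get1 c) 0]
      rfl
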